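-- pv_equiv track=rewrite | github.com/Neuronspeeed/A-J | old/latent_thinking.py | compare_decimal_strings
-- ===== SOURCE A (Python) =====
-- def compare_decimal_strings(expected, actual):
--     """
--     Compares two strings representing decimal numbers and counts the number of correct digits (ignoring the decimal point)
--     from the most significant digit until the first mismatch.
--
--     Args:
--         expected (str): The expected number as a string (e.g., '5.264')
--         actual (str): The actual number as a string (e.g., '5.164')
--     Returns:
--         int: The number of correct digits from the start (ignoring the decimal point)
--
--     Examples:
--         compare_decimal_strings('5.264', '4.264') -> 0
--         compare_decimal_strings('5.264', '5.164') -> 1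
--         compare_decimal_strings('5.264', '5.263') -> 3
--         compare_decimal_strings('12.345', '12.349') -> 4
--         compare_decimal_strings('12.345', '12.345') -> 5
--     """
--     # Remove decimal points
--     exp_digits = expected.replace('.', '')
--     act_digits = actual.replace('.', '')
--
--     # Compare digit by digit
--     correct = 0
--     for e, a in zip(exp_digits, act_digits):
--         if e == a:
--             correct += 1
--         else:
--             break
--     return correct
-- ===== SOURCE B (Python) =====
-- def compare_decimal_strings(expected, actual):
--     # Binary search for the longest k with e[:k] == a[:k] (the count of
--     # matching leading digits), instead of a linear digit-by-digit scan.
--     e = expected.replace('.', '')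
--     a = actual.replace('.', '')
--     lo, hi = 0, min(len(e), len(a))
--     while lo < hi:
--         mid = (lo + hi + 1) // 2
--         if e[:mid] == a[:mid]:
--             lo = mid
--         else:
--             hi = mid - 1
--     return lo
-- ===== Notes on version B (the rewrite author's own statement) =====
-- stated objective: alternative
-- what changed: B replaces A's digit-by-digit counting loop with a binary search over the prefix length, comparing whole slices e[:mid] == a[:mid] to find the longest matching prefix.
import Mathlib
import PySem

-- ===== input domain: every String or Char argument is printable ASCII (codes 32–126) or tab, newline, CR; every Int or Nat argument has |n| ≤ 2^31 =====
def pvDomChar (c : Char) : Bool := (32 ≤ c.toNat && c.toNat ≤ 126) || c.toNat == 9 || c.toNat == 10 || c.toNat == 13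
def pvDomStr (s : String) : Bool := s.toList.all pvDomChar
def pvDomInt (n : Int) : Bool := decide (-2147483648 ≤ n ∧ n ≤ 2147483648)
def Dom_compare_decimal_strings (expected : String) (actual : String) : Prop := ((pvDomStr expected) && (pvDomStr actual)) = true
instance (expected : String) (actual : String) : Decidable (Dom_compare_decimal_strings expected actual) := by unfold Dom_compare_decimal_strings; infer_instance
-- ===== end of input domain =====

-- B replaces A's digit-by-digit counting loop with a binary search over the prefix
-- length (whole-slice comparisons e[:mid] == a[:mid]); alternative algorithm, same result.

-- ===== PORT A =====
-- the 'for e, a in zip(...): if e == a: correct += 1 else: break' loop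
def pvALoop : List (Char × Char) → Int → Int
  | [], c => c
  | (e, a) :: rest, c => if e == a then pvALoop rest (c + 1) else c

def compare_decimal_strings (expected : String) (actual : String) : Int :=
  let exp_digits := PySem.Str.replace expected "." ""
  let act_digits := PySem.Str.replace actual "." ""
  pvALoop (List.zip exp_digits.toList act_digits.toList) 0

-- ===== PORT B =====
-- the 'while lo < hi: mid = (lo+hi+1)//2; if e[:mid]==a[:mid]: lo = mid else: hi = mid-1' loop.
-- lo, hi are Python ints that are provably ≥ 0 throughout (lo starts at 0 and only grows),
-- so they are carried as Nat; '(lo+hi+1)//2' on nonnegative ints is Nat division, and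
-- 'e[:mid]' for 0 ≤ mid is PySem.List.slice with upper bound mid, i.e. List.take mid.
def pvBSearch (e a : List Char) (lo hi : Nat) : Nat :=
  if _h : lo < hi then
    let mid := (lo + hi + 1) / 2
    if e.take mid == a.take mid then pvBSearch e a mid hi
    else pvBSearch e a lo (mid - 1)
  else lo
termination_by hi - lo
decreasing_by all_goals omega

def compare_decimal_strings_alt (expected : String) (actual : String) : Int :=
  let e := (PySem.Str.replace expected "." "").toList
  let a := (PySem.Str.replace actual "." "").toList
  (pvBSearch e a 0 (min e.length a.length) : Nat)

-- ===== PRECONDITION & SPEC =====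
def Spec_compare_decimal_strings (expected : String) (actual : String) (out : Int) : Prop := out = compare_decimal_strings_alt expected actual
instance (expected : String) (actual : String) (out : Int) : Decidable (Spec_compare_decimal_strings expected actual out) := by unfold Spec_compare_decimal_strings; infer_instance

-- ===== CLAIM (what is proved, stated in full; the proofs are below) =====
def Claim_equal_compare_decimal_strings : Prop := ∀ (expected : String) (actual : String), Dom_compare_decimal_strings expected actual → Spec_compare_decimal_strings expected actual (compare_decimal_strings expected actual)

-- ===== LEMMAS AND PROOFS =====

-- longest-common-prefix length: the common value both loops compute
def pvLcp : List Char → List Char → Nat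
  | x :: xs, y :: ys => if x = y then pvLcp xs ys + 1 else 0
  | _, _ => 0

theorem pvLcp_le_left : ∀ (e a : List Char), pvLcp e a ≤ e.length := by
  intro e; induction e with
  | nil => intro a; cases a <;> simp [pvLcp]
  | cons x xs ih =>
    intro a; cases a with
    | nil => simp [pvLcp]
    | cons y ys =>
      by_cases h : x = y <;> simp [pvLcp, h]
      exact ih ys

theorem pvLcp_le_right : ∀ (e a : List Char), pvLcp e a ≤ a.length := by
  intro e; induction e with
  | nil => intro a; cases a <;> simp [pvLcp]
  | cons x xs ih =>
    intro a; cases a with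
    | nil => simp [pvLcp]
    | cons y ys =>
      by_cases h : x = y <;> simp [pvLcp, h]
      exact ih ys

-- A's loop computes the accumulator plus the lcp length
theorem pvALoop_eq : ∀ (e a : List Char) (c : Int),
    pvALoop (List.zip e a) c = c + (pvLcp e a : Nat) := by
  intro e; induction e with
  | nil => intro a c; cases a <;> simp [pvALoop, pvLcp]
  | cons x xs ih =>
    intro a c; cases a with
    | nil => simp [pvALoop, pvLcp]
    | cons y ys =>
      by_cases h : x = y
      · simp [pvALoop, pvLcp, h, ih ys (c + 1)]; ring
      · simp [pvALoop, pvLcp, h]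

-- a prefix comparison decides position relative to the lcp
theorem take_eq_iff : ∀ (e a : List Char) (k : Nat),
    k ≤ e.length → k ≤ a.length → (e.take k = a.take k ↔ k ≤ pvLcp e a) := by
  intro e; induction e with
  | nil =>
    intro a k hk _
    have : k = 0 := by simpa using hk
    subst this; simp
  | cons x xs ih =>
    intro a k hke hka
    cases a with
    | nil => simp at hka; subst hka; simp
    | cons y ys =>
      cases k with
      | zero => simp
      | succ k =>
        simp only [List.take_succ_cons, List.cons.injEq, pvLcp]
        by_cases h : x = y
        · simpa [h] using ih ys k (by simpa using hke) (by simpa using hka)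
        · simp [h]

-- the binary search homes in on the lcp
theorem pvBSearch_eq (e a : List Char) :
    ∀ (n lo hi : Nat), hi - lo ≤ n → lo ≤ pvLcp e a → pvLcp e a ≤ hi →
      hi ≤ min e.length a.length → pvBSearch e a lo hi = pvLcp e a := by
  intro n
  induction n with
  | zero => intro lo hi h1 h2 h3 _; rw [pvBSearch]; simp only [show ¬ lo < hi by omega]; simp; omega
  | succ n ih =>
    intro lo hi h1 h2 h3 hle
    rw [pvBSearch]
    by_cases hlt : lo < hi
    · simp only [hlt, dif_pos]
      have hmid1 : lo < (lo + hi + 1) / 2 := by omega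
      have hmid2 : (lo + hi + 1) / 2 ≤ hi := by omega
      have hiff := take_eq_iff e a ((lo + hi + 1) / 2) (by omega) (by omega)
      by_cases htake : e.take ((lo + hi + 1) / 2) = a.take ((lo + hi + 1) / 2)
      · simp only [htake, beq_self_eq_true, if_true]
        exact ih _ _ (by omega) (hiff.mp htake) h3 hle
      · rw [if_neg (by simpa using htake)]
        have : ¬ ((lo + hi + 1) / 2 ≤ pvLcp e a) := fun h => htake (hiff.mpr h)
        exact ih _ _ (by omega) h2 (by omega) (by omega)
    · simp [hlt]; omega

theorem compare_decimal_strings_spec : Claim_equal_compare_decimal_strings := by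
  intro expected actual _
  show compare_decimal_strings expected actual = compare_decimal_strings_alt expected actual
  unfold compare_decimal_strings compare_decimal_strings_alt
  simp only []
  set e := (PySem.Str.replace expected "." "").toList with he
  set a := (PySem.Str.replace actual "." "").toList with ha
  rw [pvALoop_eq, pvBSearch_eq e a (min e.length a.length) 0 (min e.length a.length)
      (by omega) (Nat.zero_le _) (by have := pvLcp_le_left e a; have := pvLcp_le_right e a; omega)
      (le_refl _)]
  simp
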